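-- pv_equiv track=rewrite | github.com/PolDC27/Sem1 | Preg_test1/main.py | sum_mat
-- ===== SOURCE A (Python) =====
-- def sum_mat(matrix):
--     dict = {'#': 5, "O": 3, "X": 1, "!": -1, '!!': -3, '!!!': -5}
--     sum = 0
--     for i in range(len(matrix)):
--         for j in range(len(matrix[0])):
--             sum += dict[matrix[i][j]]
--     if sum < 0:
--         return 0
--     else:
--         return sum
-- ===== SOURCE B (Python) =====
-- def sum_mat(matrix):
--     weights = {'#': 5, "O": 3, "X": 1, "!": -1, '!!': -3, '!!!': -5}
--     tally = {}
--     for i in range(len(matrix)):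
--         for j in range(len(matrix[0])):
--             sym = matrix[i][j]
--             tally[sym] = tally.get(sym, 0) + 1
--     total = sum(weights[sym] * cnt for sym, cnt in tally.items())
--     return max(0, total)
-- ===== Notes on version B (the rewrite author's own statement) =====
-- stated objective: alternative
-- what changed: B tallies symbol frequencies in one pass into a dict and then combines a second pass over the distinct symbols (weight * count), returning max(0, total), instead of looking up the weight and adding it per cell.
import Mathlib
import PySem

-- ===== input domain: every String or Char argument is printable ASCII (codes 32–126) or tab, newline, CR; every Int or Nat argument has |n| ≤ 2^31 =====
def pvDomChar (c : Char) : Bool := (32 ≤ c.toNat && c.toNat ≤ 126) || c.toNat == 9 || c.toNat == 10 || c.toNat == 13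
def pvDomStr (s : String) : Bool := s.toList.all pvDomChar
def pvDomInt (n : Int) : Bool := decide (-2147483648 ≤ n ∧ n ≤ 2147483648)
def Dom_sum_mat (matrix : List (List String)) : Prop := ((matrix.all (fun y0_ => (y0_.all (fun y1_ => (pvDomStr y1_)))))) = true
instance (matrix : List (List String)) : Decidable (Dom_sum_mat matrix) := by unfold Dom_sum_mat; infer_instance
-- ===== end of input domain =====

-- B builds a frequency dict in one pass and combines distinct symbols (weight * count) in a
-- second pass, returning max(0, total) — an alternative decomposition, same return value.

-- the symbol-weight dict both Pythons build
def pvWeights : PySem.Dict String Int :=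
  (((((PySem.Dict.empty.insert "#" 5).insert "O" 3).insert "X" 1).insert "!" (-1)).insert "!!" (-3)).insert "!!!" (-5)

-- ===== PORT A =====
def sum_mat (matrix : List (List String)) : Int :=
  let d := pvWeights
  let s : Int :=
    (PySem.List.pyRange 0 matrix.length 1).foldl (fun s i =>
      (PySem.List.pyRange 0 (PySem.List.pyGetD matrix 0 []).length 1).foldl (fun s j =>
        s + d.getD (PySem.List.pyGetD (PySem.List.pyGetD matrix i []) j "") 0) s) 0
  if s < 0 then 0 else s

-- ===== PORT B =====
def sum_mat_alt (matrix : List (List String)) : Int :=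
  let weights := pvWeights
  let tally : PySem.Dict String Int :=
    (PySem.List.pyRange 0 matrix.length 1).foldl (fun t i =>
      (PySem.List.pyRange 0 (PySem.List.pyGetD matrix 0 []).length 1).foldl (fun t j =>
        let sym := PySem.List.pyGetD (PySem.List.pyGetD matrix i []) j ""
        t.insert sym (t.getD sym 0 + 1)) t) PySem.Dict.empty
  let total : Int := tally.items.foldl (fun s p => s + weights.getD p.1 0 * p.2) 0
  max 0 total

-- ===== PRECONDITION & SPEC =====
-- Pre_ excludes exactly the inputs where Python A raises: a row shorter than row 0
-- (IndexError) or a symbol in the first len(matrix[0]) columns outside the weight dict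
-- (KeyError).
def Pre_sum_mat (matrix : List (List String)) : Prop :=
  ∀ row ∈ matrix, (matrix.headD []).length ≤ row.length ∧
    ∀ s ∈ row.take (matrix.headD []).length, s ∈ ["#", "O", "X", "!", "!!", "!!!"]
instance (matrix : List (List String)) : Decidable (Pre_sum_mat matrix) := by
  unfold Pre_sum_mat; infer_instance
def pvWitness_sum_mat : List (List String) := [["#", "O"], ["X", "!"]]
def Spec_sum_mat (matrix : List (List String)) (out : Int) : Prop := out = sum_mat_alt matrix
instance (matrix : List (List String)) (out : Int) : Decidable (Spec_sum_mat matrix out) := by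
  unfold Spec_sum_mat; infer_instance

-- ===== CLAIM (what is proved, stated in full; the proofs are below) =====
def Claim_equal_sum_mat : Prop := ∀ (matrix : List (List String)), Dom_sum_mat matrix → Pre_sum_mat matrix → Spec_sum_mat matrix (sum_mat matrix)

-- ===== LEMMAS AND PROOFS =====

theorem pv_nested_sum (outer : List Int) (inner : Int → List Int) (g : Int → Int → String)
    (s0 : Int) :
    outer.foldl (fun s i => (inner i).foldl (fun s j => s + pvWeights.getD (g i j) 0) s) s0
      = s0 + ((outer.flatMap (fun i => (inner i).map (g i))).map (fun x => pvWeights.getD x 0)).sum := by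
  induction outer generalizing s0 with
  | nil => simp
  | cons a l ih =>
      simp only [List.foldl_cons, List.flatMap_cons, List.map_append, List.sum_append, ih]
      rw [PySem.List.foldl_add (inner a) (fun j => pvWeights.getD (g a j) 0) s0]
      simp only [List.map_map, Function.comp_def]
      ring

theorem pv_nested_tally (outer : List Int) (inner : Int → List Int) (g : Int → Int → String)
    (t0 : PySem.Dict String Int) :
    outer.foldl (fun t i => (inner i).foldl (fun t j =>
        t.insert (g i j) (t.getD (g i j) 0 + 1)) t) t0
      = (outer.flatMap (fun i => (inner i).map (g i))).foldl
          (fun t x => t.insert x (t.getD x 0 + 1)) t0 := by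
  induction outer generalizing t0 with
  | nil => simp
  | cons a l ih =>
      simp only [List.foldl_cons, List.flatMap_cons, List.foldl_append, List.foldl_map, ih]

theorem pv_sum_ite (w : String → Int) (x : String) :
    ∀ (S : List String), S.Nodup → x ∈ S →
      (S.map (fun k => if k = x then w k else 0)).sum = w x := by
  intro S
  induction S with
  | nil => simp
  | cons a l ih =>
      intro hnd hmem
      have hna : a ∉ l := (List.nodup_cons.mp hnd).1
      have hl : l.Nodup := (List.nodup_cons.mp hnd).2
      by_cases hax : a = x
      · subst hax
        have hz : (l.map (fun k => if k = a then w k else 0)).sum = 0 := by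
          apply List.sum_eq_zero
          intro y hy
          rcases List.mem_map.mp hy with ⟨k, hk, hky⟩
          have hk' : ¬ k = a := fun hh => hna (hh ▸ hk)
          simpa [hk'] using hky.symm
        simp [hz]
      · have hxl : x ∈ l := by
          rcases List.mem_cons.mp hmem with h | h
          · exact absurd h.symm hax
          · exact h
        simp [hax, ih hl hxl]

theorem pv_weighted_count (w : String → Int) (S : List String) (hnd : S.Nodup) :
    ∀ (xs : List String), (∀ x ∈ xs, x ∈ S) →
      (S.map (fun k => w k * (xs.count k : Int))).sum = (xs.map w).sum := by
  intro xs
  induction xs with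
  | nil => intro _; simp
  | cons x l ih =>
      intro hall
      have hx : x ∈ S := hall x (List.mem_cons_self ..)
      have h1 : (S.map (fun k => w k * ((x :: l).count k : Int))).sum
          = (S.map (fun k => w k * (l.count k : Int))).sum
            + (S.map (fun k => if k = x then w k else 0)).sum := by
        rw [← List.sum_map_add]
        apply congrArg
        apply List.map_congr_left
        intro k _
        by_cases hk : k = x
        · subst hk; simp [List.count_cons_self]; ring
        · have : x ≠ k := fun hh => hk hh.symm
          simp [List.count_cons_of_ne this, hk]
      rw [h1, pv_sum_ite w x S hnd hx, ih (fun y hy => hall y (List.mem_cons_of_mem _ hy))]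
      simp [add_comm]

theorem pv_total_eq (xs : List String) :
    ((xs.foldl (fun t x => t.insert x (t.getD x 0 + 1)) PySem.Dict.empty).items.foldl
        (fun s p => s + pvWeights.getD p.1 0 * p.2) 0)
      = (xs.map (fun x => pvWeights.getD x 0)).sum := by
  rw [PySem.Dict.foldl_insert_getD_add_one_eq_counter]
  rw [PySem.List.foldl_add (PySem.Dict.counter xs).items
    (fun p => pvWeights.getD p.1 0 * p.2) 0]
  rw [PySem.Dict.items_counter]
  simp only [List.map_map, Function.comp_def, zero_add]
  exact pv_weighted_count (fun k => pvWeights.getD k 0) (PySem.Set.ofList xs)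
    (PySem.Set.nodup_ofList xs) xs (fun x hx => (PySem.Set.mem_ofList xs x).mpr hx)

-- ===== VERDICT (by name: the statement is the Claim_ definition above) =====
theorem sum_mat_spec : Claim_equal_sum_mat := by
  intro matrix _ _
  unfold Spec_sum_mat sum_mat sum_mat_alt
  dsimp only
  rw [pv_nested_sum, pv_nested_tally, pv_total_eq]
  omega
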